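-- pv_equiv track=rewrite | github.com/galyaminavas/FormalLangMatrixMult | main.py | generate_cycle_graph_str
-- ===== SOURCE A (Python) =====
-- def generate_cycle_graph_str(n):
--     if n < 2:
--         return 'error'
--     else:
--         output_string = ''
--         for i in range(n - 1):
--             output_string += '{} a {}\n'.format(i, i + 1)
--         output_string += '{} a 0'.format(n - 1)
--         return output_string
-- ===== SOURCE B (Python) =====
-- def generate_cycle_graph_str(n):
--     if n < 2:
--         return 'error'
--     return '\n'.join('{} a {}'.format(i, (i + 1) % n) for i in range(n))
-- ===== Notes on version B (the rewrite author's own statement) =====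
-- stated objective: simpler
-- what changed: Replaces string accumulation plus a special-cased final line with one uniform modular loop ('(i+1) % n') over range(n) joined by '\n'.
import Mathlib
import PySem

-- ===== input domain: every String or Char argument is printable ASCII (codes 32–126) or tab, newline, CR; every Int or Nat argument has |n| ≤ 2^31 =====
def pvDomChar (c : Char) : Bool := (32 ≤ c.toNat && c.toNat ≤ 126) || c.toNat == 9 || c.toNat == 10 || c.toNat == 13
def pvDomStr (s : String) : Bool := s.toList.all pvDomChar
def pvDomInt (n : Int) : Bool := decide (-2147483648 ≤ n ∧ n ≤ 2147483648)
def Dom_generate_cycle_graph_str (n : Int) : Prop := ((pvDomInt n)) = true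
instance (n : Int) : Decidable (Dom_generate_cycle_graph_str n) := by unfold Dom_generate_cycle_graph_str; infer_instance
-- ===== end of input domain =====

-- B replaces A's string accumulation with a special-cased closing edge by one
-- uniform modular loop over range(n) joined with '\n' (simpler decomposition).


-- ===== PORT A =====
def generate_cycle_graph_str (n : Int) : String :=
  if n < 2 then "error"
  else
    let output_string :=
      (PySem.List.pyRange 0 (n - 1)).foldl
        (fun acc i => acc ++ PySem.Int.toStr i ++ " a " ++ PySem.Int.toStr (i + 1) ++ "\n") ""
    output_string ++ PySem.Int.toStr (n - 1) ++ " a 0"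

-- ===== PORT B =====
def generate_cycle_graph_str_alt (n : Int) : String :=
  if n < 2 then "error"
  else
    PySem.Str.join "\n"
      ((PySem.List.pyRange 0 n).map
        (fun i => PySem.Int.toStr i ++ " a " ++ PySem.Int.toStr (PySem.Int.mod (i + 1) n)))

-- ===== PRECONDITION & SPEC =====
def Spec_generate_cycle_graph_str (n : Int) (out : String) : Prop := out = generate_cycle_graph_str_alt n
instance (n : Int) (out : String) : Decidable (Spec_generate_cycle_graph_str n out) := by unfold Spec_generate_cycle_graph_str; infer_instance

-- ===== CLAIM (what is proved, stated in full; the proofs are below) =====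
def Claim_equal_generate_cycle_graph_str : Prop := ∀ (n : Int), Dom_generate_cycle_graph_str n → Spec_generate_cycle_graph_str n (generate_cycle_graph_str n)

-- ===== LEMMAS AND PROOFS =====

theorem pymod_self (n : Int) : PySem.Int.mod n n = 0 := by
  simp [PySem.Int.mod, Int.fmod_self]

theorem pymod_of_lt {a b : Int} (h1 : 0 ≤ a) (h2 : a < b) : PySem.Int.mod a b = a := by
  have hb : 0 ≤ b := le_of_lt (h1.trans_lt h2)
  simp only [PySem.Int.mod]
  rw [Int.fmod_eq_emod, if_pos (Or.inl hb), add_zero]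
  exact Int.emod_eq_of_lt h1 h2

theorem str_join_singleton (p : String) : PySem.Str.join "\n" [p] = p := by
  apply String.toList_injective
  simp [PySem.Str.toList_join, PySem.Chars.join_singleton]

theorem str_join_cons_cons (p q : String) (rest : List String) :
    PySem.Str.join "\n" (p :: q :: rest) = p ++ "\n" ++ PySem.Str.join "\n" (q :: rest) := by
  apply String.toList_injective
  simp [PySem.Str.toList_join, PySem.Chars.join_cons_cons]

/-- A's accumulate-with-newline loop followed by the closing line equals
    B's join of all lines. -/
theorem foldl_newline_join (ss : List String) (last a : String) :
    ss.foldl (fun acc x => acc ++ x ++ "\n") a ++ last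
      = a ++ PySem.Str.join "\n" (ss ++ [last]) := by
  induction ss generalizing a with
  | nil => simp [str_join_singleton]
  | cons s t ih =>
    cases ht : t ++ [last] with
    | nil => exact absurd ht (by simp)
    | cons q rest =>
      simp only [List.foldl_cons, List.cons_append, ht, str_join_cons_cons]
      rw [ih (a ++ s ++ "\n"), ht]
      simp [String.append_assoc]

theorem generate_cycle_graph_str_eq_alt (n : Int) :
    generate_cycle_graph_str n = generate_cycle_graph_str_alt n := by
  by_cases h : n < 2
  · simp [generate_cycle_graph_str, generate_cycle_graph_str_alt, h]
  · have h2 : (2 : Int) ≤ n := not_lt.mp h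
    simp only [generate_cycle_graph_str, generate_cycle_graph_str_alt, if_neg h]
    -- split B's range at n - 1
    have hsplit : PySem.List.pyRange 0 n = PySem.List.pyRange 0 (n - 1) ++ [n - 1] := by
      have := PySem.List.pyRange_one_succ_right (a := 0) (b := n - 1) (by omega)
      simpa [sub_add_cancel] using this
    rw [hsplit, List.map_append]
    -- on the range part the modulus is the identity, on the last it is 0
    have hmap : (PySem.List.pyRange 0 (n - 1)).map
        (fun i => PySem.Int.toStr i ++ " a " ++ PySem.Int.toStr (PySem.Int.mod (i + 1) n))
        = (PySem.List.pyRange 0 (n - 1)).map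
        (fun i => PySem.Int.toStr i ++ " a " ++ PySem.Int.toStr (i + 1)) := by
      apply List.map_congr_left
      intro i hi
      have := PySem.List.mem_pyRange_one.mp hi
      rw [pymod_of_lt (by omega) (by omega)]
    have hlast : PySem.Int.mod (n - 1 + 1) n = 0 := by
      rw [sub_add_cancel]; exact pymod_self n
    rw [hmap]
    simp only [List.map_cons, List.map_nil, hlast]
    -- rewrite A's foldl as a foldl over the mapped lines, then use foldl_newline_join
    have hfold : (PySem.List.pyRange 0 (n - 1)).foldl
        (fun acc i => acc ++ PySem.Int.toStr i ++ " a " ++ PySem.Int.toStr (i + 1) ++ "\n") ""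
        = ((PySem.List.pyRange 0 (n - 1)).map
            (fun i => PySem.Int.toStr i ++ " a " ++ PySem.Int.toStr (i + 1))).foldl
          (fun acc x => acc ++ x ++ "\n") "" := by
      rw [List.foldl_map]
      congr 1
      funext acc i
      simp [String.append_assoc]
    rw [hfold]
    have := foldl_newline_join
      ((PySem.List.pyRange 0 (n - 1)).map
        (fun i => PySem.Int.toStr i ++ " a " ++ PySem.Int.toStr (i + 1)))
      (PySem.Int.toStr (n - 1) ++ " a " ++ PySem.Int.toStr 0) ""
    simp only [String.append_assoc] at this ⊢
    rw [show (" a " ++ PySem.Int.toStr 0 : String) = " a 0" from rfl]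
    simpa using this

-- ===== VERDICT (by name: the statement is the Claim_ definition above) =====
theorem generate_cycle_graph_str_spec : Claim_equal_generate_cycle_graph_str := by
  intro n _
  unfold Spec_generate_cycle_graph_str
  exact generate_cycle_graph_str_eq_alt n
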